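-- pv_equiv track=rewrite | github.com/bob686868/Leetcode-100-day-challenge- | day30.py | maxNumOfPtsFromQueries
-- ===== SOURCE A (Python) =====
-- import heapq
-- from collections import defaultdict
--
-- def maxNumOfPtsFromQueries(grid,queries):
--     ## map each query to its orginal index
--     queryToIndex=defaultdict(list)
--     for i,q in enumerate(queries):
--         queryToIndex[q].append(i)
--     queries.sort()
--     minHeap=[(grid[0][0],0,0)] ## (value,r,c)
--     curScore=0
--     result=[0]*len(queries)
--     visit={(0,0)}
--     dirs=[(0,1),(1,0),(0,-1),(-1,0)]
--
--
--     for q in queries: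
--         while minHeap:
--             val,x,y=heapq.heappop(minHeap)
--             if val>=q:
--                 heapq.heappush(minHeap,(val,x,y))
--                 break
--             curScore+=1
--             for dx,dy in dirs:
--                 newX,newY=x+dx,y+dy
--                 if not (0<=newX<=len(grid)-1) or not (0<=newY<=len(grid[0])-1):continue
--                 if (newX,newY) not in visit:
--                     visit.add((newX,newY))
--                     heapq.heappush(minHeap,(grid[newX][newY],newX,newY))
--
--         result[queryToIndex[q][-1]]=curScore
--         queryToIndex[q].pop()
--
--     return result
-- ===== SOURCE B (Python) =====
-- from collections import deque
--
-- def maxNumOfPtsFromQueries(grid, queries):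
--     # Independent per-query BFS flood fill (no heap, no state carried between
--     # queries).  `queries` is sorted in place, matching A's side effect; the
--     # returned list is in the original query order.
--     order = list(queries)
--     queries.sort()
--     rows, cols = len(grid), len(grid[0])
--
--     def component_size(q):
--         if not grid[0][0] < q:
--             return 0
--         region = {(0, 0)}
--         queue = deque([(0, 0)])
--         while queue:
--             x, y = queue.popleft()
--             for c in ((x - 1, y), (x + 1, y), (x, y - 1), (x, y + 1)):
--                 if 0 <= c[0] < rows and 0 <= c[1] < cols and c not in region \
--                         and grid[c[0]][c[1]] < q:
--                     region.add(c)
--                     queue.append(c)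
--         return len(region)
--
--     return [component_size(q) for q in order]
-- ===== Notes on version B (the rewrite author's own statement) =====
-- stated objective: alternative
-- what changed: Replaces the stateful best-first search (one min-heap and a running score carried across the sorted queries, results scattered through an index dict) by an independent per-query BFS flood fill over a set, mapped directly over the original query order.
-- outside the precondition, e.g. on maxNumOfPtsFromQueries([[5, 9], [7]], [6]): A returns [1], B returns [1]
import Mathlib
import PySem

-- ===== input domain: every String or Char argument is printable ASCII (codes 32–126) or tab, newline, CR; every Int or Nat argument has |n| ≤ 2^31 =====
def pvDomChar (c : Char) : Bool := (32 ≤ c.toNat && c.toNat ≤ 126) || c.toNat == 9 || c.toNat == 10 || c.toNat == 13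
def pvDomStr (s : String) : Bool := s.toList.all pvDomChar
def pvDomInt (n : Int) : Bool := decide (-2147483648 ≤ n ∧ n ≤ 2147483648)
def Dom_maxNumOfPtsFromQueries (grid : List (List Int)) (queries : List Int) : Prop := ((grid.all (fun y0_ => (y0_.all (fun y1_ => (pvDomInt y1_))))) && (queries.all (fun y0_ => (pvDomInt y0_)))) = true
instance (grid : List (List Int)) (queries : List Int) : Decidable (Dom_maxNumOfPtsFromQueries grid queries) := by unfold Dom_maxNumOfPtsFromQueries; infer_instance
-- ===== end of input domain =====

-- B computes each answer by an independent per-query BFS flood fill instead of A's single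
-- min-heap best-first search threaded through the sorted queries with an index dict.
-- Like A, B sorts `queries` in place (a side effect; the equivalence proved is about the
-- return value, which is in the original query order for both).

-- ===== PORT A =====
-- grid[x][y] (x, y ≥ 0 at every use; exact whenever Python does not raise — Pre_ excludes raises)
def pvCell (grid : List (List Int)) (x y : Int) : Int :=
  PySem.List.pyGetD (PySem.List.pyGetD grid x []) y 0

-- lexicographic ≤ on (value, r, c) triples, Python's tuple order
def pvLexLe (a b : Int × Int × Int) : Bool :=
  a.1 < b.1 || (a.1 == b.1 && (a.2.1 < b.2.1 || (a.2.1 == b.2.1 && a.2.2 ≤ b.2.2)))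

-- heapq.heappop modelled as extract-min (exact here: all heap entries are distinct triples,
-- so heapq's pop order is exactly repeated minimum extraction); heappush is cons.
def pvPopMin : List (Int × Int × Int) → Option ((Int × Int × Int) × List (Int × Int × Int))
  | [] => none
  | a :: rest =>
    match pvPopMin rest with
    | none => some (a, [])
    | some (m, r) => if pvLexLe a m then some (a, rest) else some (m, a :: r)

def pvDirs : List (Int × Int) := [(0, 1), (1, 0), (0, -1), (-1, 0)]

-- the body of `for dx,dy in dirs: …` (state = (visit, minHeap))
def pvExpand (grid : List (List Int)) (x y : Int)
    (st : PySem.Set (Int × Int) × List (Int × Int × Int)) (d : Int × Int) :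
    PySem.Set (Int × Int) × List (Int × Int × Int) :=
  let newX := x + d.1
  let newY := y + d.2
  if ¬(0 ≤ newX ∧ newX ≤ PySem.List.len grid - 1) ∨
     ¬(0 ≤ newY ∧ newY ≤ PySem.List.len (PySem.List.pyGetD grid 0 []) - 1) then st
  else if (newX, newY) ∈ st.1 then st
  else (PySem.Set.add st.1 (newX, newY), (pvCell grid newX newY, newX, newY) :: st.2)

-- `while minHeap: …` (fuel-bounded structural recursion; the fuel passed by the port is
-- proved sufficient under Pre_, so the 0-fuel branch is never taken there)
def pvAWhile (grid : List (List Int)) (q : Int) :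
    Nat → List (Int × Int × Int) → PySem.Set (Int × Int) → Int →
    List (Int × Int × Int) × PySem.Set (Int × Int) × Int
  | 0, heap, visit, score => (heap, visit, score)
  | Nat.succ fuel, heap, visit, score =>
    match pvPopMin heap with
    | none => (heap, visit, score)
    | some ((v, x, y), rest) =>
      if q ≤ v then ((v, x, y) :: rest, visit, score)
      else
        let st := pvDirs.foldl (pvExpand grid x y) (visit, rest)
        pvAWhile grid q fuel st.2 st.1 (score + 1)

def maxNumOfPtsFromQueries (grid : List (List Int)) (queries : List Int) : List Int :=
  let queryToIndex : PySem.Dict Int (List Int) :=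
    (PySem.List.enumerate queries 0).foldl (fun d p => d.modify p.2 [] (· ++ [p.1])) PySem.Dict.empty
  let sortedQ := PySem.List.sorted queries (fun x => x) false   -- queries.sort() (in place)
  let minHeap : List (Int × Int × Int) := [(pvCell grid 0 0, 0, 0)]
  let result : List Int := PySem.List.pyRepeat [(0 : Int)] (PySem.List.len queries)
  let visit : PySem.Set (Int × Int) := PySem.Set.ofList [((0 : Int), (0 : Int))]
  let fuel : Nat := grid.length * (grid.headI).length * 3 + 3
  let final := sortedQ.foldl
    (fun st q =>
      let (heap, score, result, visit, d) := st
      let w := pvAWhile grid q fuel heap visit score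
      let lst := PySem.Dict.getD d q []
      let idx := PySem.List.pyGetD lst (-1) 0           -- queryToIndex[q][-1]
      let result' := PySem.List.pySetD result idx w.2.2  -- result[…] = curScore
      let d' := d.insert q lst.dropLast                  -- queryToIndex[q].pop()
      (w.1, w.2.2, result', w.2.1, d'))
    (minHeap, (0 : Int), result, visit, queryToIndex)
  final.2.2.1

-- ===== PORT B =====
-- one neighbour check of the BFS (state = (region, queue))
def pvBExpand (grid : List (List Int)) (rows cols q : Int)
    (st : PySem.Set (Int × Int) × List (Int × Int)) (c : Int × Int) :
    PySem.Set (Int × Int) × List (Int × Int) :=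
  if 0 ≤ c.1 ∧ c.1 < rows ∧ 0 ≤ c.2 ∧ c.2 < cols ∧ ¬(c ∈ st.1) ∧ pvCell grid c.1 c.2 < q
  then (PySem.Set.add st.1 c, st.2 ++ [c]) else st

-- `while queue: …` (fuel-bounded structural recursion; the fuel passed by the port is
-- proved sufficient under Pre_, so the 0-fuel branch is never taken there)
def pvBFlood (grid : List (List Int)) (rows cols q : Int) :
    Nat → PySem.Set (Int × Int) → List (Int × Int) → PySem.Set (Int × Int)
  | 0, region, _ => region
  | Nat.succ fuel, region, queue =>
    match queue with
    | [] => region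
    | (x, y) :: rest =>
      let st := [(x - 1, y), (x + 1, y), (x, y - 1), (x, y + 1)].foldl
        (pvBExpand grid rows cols q) (region, rest)
      pvBFlood grid rows cols q fuel st.1 st.2

def pvCompSize (grid : List (List Int)) (rows cols q : Int) : Int :=
  if ¬(pvCell grid 0 0 < q) then 0
  else
    PySem.Set.len (pvBFlood grid rows cols q (rows.toNat * cols.toNat * 3 + 3)
      (PySem.Set.ofList [((0 : Int), (0 : Int))]) [((0 : Int), (0 : Int))])

def maxNumOfPtsFromQueries_alt (grid : List (List Int)) (queries : List Int) : List Int :=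
  let order := queries
  -- queries.sort() only mutates the argument in place; the returned value uses `order`
  let rows := PySem.List.len grid
  let cols := PySem.List.len (PySem.List.pyGetD grid 0 [])
  order.map (fun q => pvCompSize grid rows cols q)

-- ===== PRECONDITION & SPEC =====
-- Pre_ excludes empty grids / empty first rows (A raises IndexError on grid[0][0]) and grids
-- with a row shorter than the first row, on which either flood fill raises IndexError as soon
-- as it reaches a missing cell (on such grids whose short rows happen to be unreachable both
-- programs still return, with the same value — see the cite).
def Pre_maxNumOfPtsFromQueries (grid : List (List Int)) (queries : List Int) : Prop :=
  grid ≠ [] ∧ grid.headI ≠ [] ∧ ∀ row ∈ grid, (grid.headI).length ≤ row.length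
instance (grid : List (List Int)) (queries : List Int) : Decidable (Pre_maxNumOfPtsFromQueries grid queries) := by unfold Pre_maxNumOfPtsFromQueries; infer_instance

def pvWitness_maxNumOfPtsFromQueries : List (List Int) × List Int := ([[0]], [])

def Spec_maxNumOfPtsFromQueries (grid : List (List Int)) (queries : List Int) (out : List Int) : Prop := out = maxNumOfPtsFromQueries_alt grid queries
instance (grid : List (List Int)) (queries : List Int) (out : List Int) : Decidable (Spec_maxNumOfPtsFromQueries grid queries out) := by unfold Spec_maxNumOfPtsFromQueries; infer_instance

-- ===== CLAIM (what is proved, stated in full; the proofs are below) =====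
def Claim_equal_maxNumOfPtsFromQueries : Prop := ∀ (grid : List (List Int)) (queries : List Int), Dom_maxNumOfPtsFromQueries grid queries → Pre_maxNumOfPtsFromQueries grid queries → Spec_maxNumOfPtsFromQueries grid queries (maxNumOfPtsFromQueries grid queries)

-- ===== LEMMAS AND PROOFS =====

-- ---------- shared abstractions ----------
def pvR (g : List (List Int)) : Int := g.length
def pvC (g : List (List Int)) : Int := (g.headI).length
def pvIn (g : List (List Int)) (p : Int × Int) : Prop :=
  0 ≤ p.1 ∧ p.1 < pvR g ∧ 0 ≤ p.2 ∧ p.2 < pvC g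
def pvVal (g : List (List Int)) (p : Int × Int) : Int := pvCell g p.1 p.2

def pvAdj (p p' : Int × Int) : Prop := ∃ d ∈ pvDirs, p' = (p.1 + d.1, p.2 + d.2)

-- cells reachable from (0,0) through cells of value < q
inductive pvReach (g : List (List Int)) (q : Int) : Int × Int → Prop
  | base : pvVal g (0, 0) < q → pvReach g q (0, 0)
  | step {p p' : Int × Int} : pvReach g q p → pvAdj p p' → pvIn g p' → pvVal g p' < q →
      pvReach g q p'

lemma pvAdj_iff (p c : Int × Int) :
    pvAdj p c ↔ p = (c.1 - 1, c.2) ∨ p = (c.1 + 1, c.2) ∨ p = (c.1, c.2 - 1) ∨ p = (c.1, c.2 + 1) := by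
  constructor
  · rintro ⟨d, hd, rfl⟩
    simp only [pvDirs, List.mem_cons, List.not_mem_nil, or_false] at hd
    rcases hd with rfl | rfl | rfl | rfl <;> simp only [Prod.ext_iff] <;> omega
  · intro h
    rcases h with h | h | h | h
    · exact ⟨(1, 0), by simp [pvDirs], by subst h; simp only [Prod.ext_iff]; omega⟩
    · exact ⟨(-1, 0), by simp [pvDirs], by subst h; simp only [Prod.ext_iff]; omega⟩
    · exact ⟨(0, 1), by simp [pvDirs], by subst h; simp only [Prod.ext_iff]; omega⟩
    · exact ⟨(0, -1), by simp [pvDirs], by subst h; simp only [Prod.ext_iff]; omega⟩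

lemma pvReach_mono {g : List (List Int)} {q q' : Int} (h : q ≤ q') {p : Int × Int}
    (hr : pvReach g q p) : pvReach g q' p := by
  induction hr with
  | base hb => exact .base (lt_of_lt_of_le hb h)
  | step _ hadj hin hval ih => exact .step ih hadj hin (lt_of_lt_of_le hval h)

lemma pvReach_not_base {g : List (List Int)} {q : Int} (h : ¬ pvVal g (0, 0) < q)
    {p : Int × Int} : ¬ pvReach g q p := by
  intro hr
  induction hr with
  | base hb => exact h hb
  | step _ _ _ _ ih => exact ih

-- any sound, closed set containing the start is exactly the reachable set
lemma pv_sandwich {g : List (List Int)} {q : Int} (S : List (Int × Int))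
    (sound : ∀ p ∈ S, pvReach g q p)
    (base : pvVal g (0, 0) < q → (0, 0) ∈ S)
    (closed : ∀ p ∈ S, ∀ p', pvAdj p p' → pvIn g p' → pvVal g p' < q → p' ∈ S) :
    ∀ p, p ∈ S ↔ pvReach g q p := by
  intro p
  constructor
  · exact sound p
  · intro hr
    induction hr with
    | base hb => exact base hb
    | step _ hadj hin hval ih => exact closed _ ih _ hadj hin hval

lemma pv_count_unique {α : Type} (S T : List α) (hS : S.Nodup) (hT : T.Nodup)
    (h : ∀ a, a ∈ S ↔ a ∈ T) : S.length = T.length :=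
  ((List.perm_ext_iff_of_nodup hS hT).2 h).length_eq

-- all in-range cells, and the basic cardinality bound
def pvScan (rows cols : Int) : List (Int × Int) :=
  (PySem.List.pyRange 0 rows 1).flatMap (fun x => (PySem.List.pyRange 0 cols 1).map (fun y => (x, y)))

lemma pv_mem_scan {rows cols : Int} {c : Int × Int} :
    c ∈ pvScan rows cols ↔ 0 ≤ c.1 ∧ c.1 < rows ∧ 0 ≤ c.2 ∧ c.2 < cols := by
  constructor
  · intro h
    simp only [pvScan, List.mem_flatMap, List.mem_map, PySem.List.mem_pyRange_one] at h
    obtain ⟨x, hx, y, hy, rfl⟩ := h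
    exact ⟨hx.1, hx.2, hy.1, hy.2⟩
  · rintro ⟨h1, h2, h3, h4⟩
    simp only [pvScan, List.mem_flatMap, List.mem_map, PySem.List.mem_pyRange_one]
    exact ⟨c.1, ⟨h1, h2⟩, c.2, ⟨h3, h4⟩, rfl⟩

lemma pv_mem_scan_in {g : List (List Int)} {c : Int × Int} :
    c ∈ pvScan (pvR g) (pvC g) ↔ pvIn g c := by
  rw [pv_mem_scan]; rfl

lemma pv_length_scan (rows cols : Int) :
    (pvScan rows cols).length = rows.toNat * cols.toNat := by
  simp [pvScan, List.length_flatMap, PySem.List.length_pyRange_one]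

lemma pv_card_bound {g : List (List Int)} (S : List (Int × Int)) (hS : S.Nodup)
    (h : ∀ p ∈ S, pvIn g p) : S.length ≤ (pvR g * pvC g).toNat := by
  have hsub : S ⊆ pvScan (pvR g) (pvC g) := fun p hp => pv_mem_scan_in.2 (h p hp)
  have h1 := (hS.subperm hsub).length_le
  rw [pv_length_scan] at h1
  have h2 : (pvR g * pvC g).toNat = (pvR g).toNat * (pvC g).toNat := by
    rw [pvR, pvC, ← Nat.cast_mul, Int.toNat_natCast, Int.toNat_natCast, Int.toNat_natCast]
  rw [h2]
  exact h1

-- ---------- B-side: the BFS flood fill computes the reachable set ----------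

def pvNbrs (c : Int × Int) : List (Int × Int) :=
  [(c.1 - 1, c.2), (c.1 + 1, c.2), (c.1, c.2 - 1), (c.1, c.2 + 1)]

lemma mem_pvNbrs_iff (p c : Int × Int) : p ∈ pvNbrs c ↔ pvAdj c p := by
  rw [pvAdj_iff c p]
  simp only [pvNbrs, List.mem_cons, List.not_mem_nil, or_false, Prod.ext_iff]
  omega

lemma pvBExpand_fold (g : List (List Int)) (q : Int) :
    ∀ (cs : List (Int × Int)) (V : PySem.Set (Int × Int)) (Q : List (Int × Int)),
    ∃ ext : List (Int × Int),
      (cs.foldl (pvBExpand g (pvR g) (pvC g) q) (V, Q)).1 = V ++ ext ∧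
      (cs.foldl (pvBExpand g (pvR g) (pvC g) q) (V, Q)).2 = Q ++ ext ∧
      ext.Nodup ∧
      (∀ c ∈ ext, c ∉ V ∧ pvIn g c ∧ pvVal g c < q ∧ c ∈ cs) ∧
      (∀ c ∈ cs, pvIn g c → pvVal g c < q → c ∈ V ++ ext) := by
  intro cs
  induction cs with
  | nil =>
    intro V Q
    exact ⟨[], by simp, by simp, by simp, by simp, by simp⟩
  | cons c cs ih =>
    intro V Q
    simp only [List.foldl_cons]
    by_cases hc : (0 ≤ c.1 ∧ c.1 < pvR g ∧ 0 ≤ c.2 ∧ c.2 < pvC g ∧ ¬(c ∈ V) ∧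
        pvCell g c.1 c.2 < q)
    · have hstep : pvBExpand g (pvR g) (pvC g) q (V, Q) c = (V ++ [c], Q ++ [c]) := by
        unfold pvBExpand
        rw [if_pos hc, PySem.Set.add_of_not_mem hc.2.2.2.2.1]
      rw [hstep]
      obtain ⟨ext, h1, h2, h3, h4, h5⟩ := ih (V ++ [c]) (Q ++ [c])
      refine ⟨c :: ext, ?_, ?_, ?_, ?_, ?_⟩
      · rw [h1]; simp
      · rw [h2]; simp
      · refine List.nodup_cons.2 ⟨fun hcm => ?_, h3⟩
        exact (h4 c hcm).1 (List.mem_append.2 (Or.inr (List.mem_singleton.2 rfl)))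
      · intro c' hc'
        rcases List.mem_cons.1 hc' with rfl | hc'
        · exact ⟨hc.2.2.2.2.1, ⟨hc.1, hc.2.1, hc.2.2.1, hc.2.2.2.1⟩, hc.2.2.2.2.2,
            List.mem_cons_self ..⟩
        · obtain ⟨e1, e2, e3, e4⟩ := h4 c' hc'
          exact ⟨fun hv => e1 (List.mem_append.2 (Or.inl hv)), e2, e3,
            List.mem_cons_of_mem _ e4⟩
      · intro c' hc' hin hval
        rcases List.mem_cons.1 hc' with rfl | hc'
        · exact List.mem_append.2 (Or.inr (List.mem_cons_self ..))
        · have := h5 c' hc' hin hval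
          rw [List.append_assoc] at this
          simpa using this
    · have hstep : pvBExpand g (pvR g) (pvC g) q (V, Q) c = (V, Q) := by
        unfold pvBExpand
        rw [if_neg hc]
      rw [hstep]
      obtain ⟨ext, h1, h2, h3, h4, h5⟩ := ih V Q
      refine ⟨ext, h1, h2, h3, fun c' hc' => ?_, ?_⟩
      · obtain ⟨e1, e2, e3, e4⟩ := h4 c' hc'
        exact ⟨e1, e2, e3, List.mem_cons_of_mem _ e4⟩
      · intro c' hc' hin hval
        rcases List.mem_cons.1 hc' with rfl | hc'
        · obtain ⟨i1, i2, i3, i4⟩ := hin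
          have hcm : c' ∈ V := by
            by_contra hno
            exact hc ⟨i1, i2, i3, i4, hno, hval⟩
          exact List.mem_append.2 (Or.inl hcm)
        · exact h5 c' hc' hin hval

lemma pvBFlood_spec (g : List (List Int)) (q : Int) :
    ∀ (fuel : Nat) (region : PySem.Set (Int × Int)) (queue : List (Int × Int)),
    region.Nodup → queue.Nodup → (∀ c ∈ queue, c ∈ region) →
    (∀ p ∈ region, pvIn g p) → (∀ p ∈ region, pvReach g q p) →
    ((0, 0) : Int × Int) ∈ region →
    (∀ p ∈ region, p ∉ queue → ∀ p', pvAdj p p' → pvIn g p' → pvVal g p' < q → p' ∈ region) →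
    queue.length + 2 * ((pvR g * pvC g).toNat - region.length) < fuel →
    (pvBFlood g (pvR g) (pvC g) q fuel region queue).Nodup ∧
    (∀ p ∈ pvBFlood g (pvR g) (pvC g) q fuel region queue, pvReach g q p) ∧
    ((0, 0) : Int × Int) ∈ pvBFlood g (pvR g) (pvC g) q fuel region queue ∧
    (∀ p ∈ pvBFlood g (pvR g) (pvC g) q fuel region queue, ∀ p',
      pvAdj p p' → pvIn g p' → pvVal g p' < q →
        p' ∈ pvBFlood g (pvR g) (pvC g) q fuel region queue) := by
  intro fuel
  induction fuel with
  | zero => intro region queue _ _ _ _ _ _ _ hf; omega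
  | succ fuel ih =>
    intro region queue hndR hndQ hQsub hRin hRsound h0 hclosed hf
    cases queue with
    | nil =>
      have hred : pvBFlood g (pvR g) (pvC g) q (fuel + 1) region [] = region := rfl
      rw [hred]
      exact ⟨hndR, hRsound, h0, fun p hp => hclosed p hp (List.not_mem_nil)⟩
    | cons c rest =>
      obtain ⟨x, y⟩ := c
      obtain ⟨ext, hV, hQ, hextnd, hextP, hcov⟩ :=
        pvBExpand_fold g q (pvNbrs (x, y)) region rest
      set st := (pvNbrs (x, y)).foldl (pvBExpand g (pvR g) (pvC g) q) (region, rest) with hst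
      have hred : pvBFlood g (pvR g) (pvC g) q (fuel + 1) region ((x, y) :: rest) =
          pvBFlood g (pvR g) (pvC g) q fuel st.1 st.2 := rfl
      rw [hred, hV, hQ]
      have hheadR : ((x, y) : Int × Int) ∈ region := hQsub _ (List.mem_cons_self ..)
      have hextNotR : ∀ c' ∈ ext, c' ∉ region := fun c' hc' => (hextP c' hc').1
      have hrestR : ∀ c' ∈ rest, c' ∈ region := fun c' hc' =>
        hQsub c' (List.mem_cons_of_mem _ hc')
      have hndR' : (region ++ ext).Nodup := by
        rw [List.nodup_append]
        exact ⟨hndR, hextnd, fun a ha b hb hab => hextNotR b hb (hab ▸ ha)⟩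
      have hRin' : ∀ p ∈ region ++ ext, pvIn g p := by
        intro p hp
        rcases List.mem_append.1 hp with hp | hp
        · exact hRin p hp
        · exact (hextP p hp).2.1
      refine ih (region ++ ext) (rest ++ ext) hndR' ?_ ?_ hRin' ?_ ?_ ?_ ?_
      · rw [List.nodup_append]
        exact ⟨(List.nodup_cons.1 hndQ).2, hextnd,
          fun a ha b hb hab => hextNotR b hb (hab ▸ hrestR a ha)⟩
      · intro c' hc'
        rcases List.mem_append.1 hc' with hc' | hc'
        · exact List.mem_append.2 (Or.inl (hrestR c' hc'))
        · exact List.mem_append.2 (Or.inr hc')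
      · intro p hp
        rcases List.mem_append.1 hp with hp | hp
        · exact hRsound p hp
        · obtain ⟨-, hin', hval', hmem'⟩ := hextP p hp
          exact pvReach.step (hRsound _ hheadR) ((mem_pvNbrs_iff p (x, y)).1 hmem') hin' hval'
      · exact List.mem_append.2 (Or.inl h0)
      · intro p hp hpq p' hadj hin' hval'
        rcases List.mem_append.1 hp with hp | hp
        · by_cases hphead : p = ((x, y) : Int × Int)
          · subst hphead
            exact hcov p' ((mem_pvNbrs_iff p' (x, y)).2 hadj) hin' hval'
          · have hpnot : p ∉ ((x, y) :: rest : List (Int × Int)) := by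
              intro hmem
              rcases List.mem_cons.1 hmem with h | h
              · exact hphead h
              · exact hpq (List.mem_append.2 (Or.inl h))
            exact List.mem_append.2 (Or.inl (hclosed p hp hpnot p' hadj hin' hval'))
        · exact absurd (List.mem_append.2 (Or.inr hp)) hpq
      · have hbound := pv_card_bound (g := g) (region ++ ext) hndR' hRin'
        simp only [List.length_append, List.length_cons] at hf hbound ⊢
        omega

-- B's per-query function counts exactly the reachable cells
lemma pvCompSize_spec (g : List (List Int)) (h00 : pvIn g (0, 0)) (q : Int) :
    ∃ S : List (Int × Int), S.Nodup ∧ (∀ p, p ∈ S ↔ pvReach g q p) ∧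
      pvCompSize g (pvR g) (pvC g) q = (S.length : Int) := by
  by_cases h0 : pvCell g 0 0 < q
  · have hred : pvCompSize g (pvR g) (pvC g) q =
        PySem.Set.len (pvBFlood g (pvR g) (pvC g) q
          ((pvR g).toNat * (pvC g).toNat * 3 + 3)
          [((0 : Int), (0 : Int))] [((0 : Int), (0 : Int))]) := by
      unfold pvCompSize
      rw [if_neg (by simpa using h0)]
      rfl
    have hN : (pvR g * pvC g).toNat = (pvR g).toNat * (pvC g).toNat := by
      rw [pvR, pvC, ← Nat.cast_mul, Int.toNat_natCast, Int.toNat_natCast, Int.toNat_natCast]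
    obtain ⟨hnd, hsound, hmem0, hclosed⟩ :=
      pvBFlood_spec g q ((pvR g).toNat * (pvC g).toNat * 3 + 3)
        [((0 : Int), (0 : Int))] [((0 : Int), (0 : Int))]
        (by simp) (by simp) (by simp)
        (by intro p hp; simp only [List.mem_singleton] at hp; subst hp; exact h00)
        (by intro p hp; simp only [List.mem_singleton] at hp; subst hp; exact pvReach.base h0)
        (by simp)
        (by intro p hp hpq; exact absurd hp hpq)
        (by simp only [List.length_singleton]; omega)
    refine ⟨_, hnd, pv_sandwich _ hsound (fun _ => hmem0) hclosed, ?_⟩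
    rw [hred]
    simp [PySem.Set.len]
  · refine ⟨[], by simp, fun p => ?_, ?_⟩
    · simp only [List.not_mem_nil, false_iff]
      exact pvReach_not_base h0
    · unfold pvCompSize
      rw [if_pos (by simpa using h0)]
      simp

-- ---------- A-side: the heap loop computes the same reachable set ----------

lemma pvLexLe_fst {a b : Int × Int × Int} (h : pvLexLe a b = true) : a.1 ≤ b.1 := by
  unfold pvLexLe at h
  simp only [Bool.or_eq_true, Bool.and_eq_true, decide_eq_true_eq, beq_iff_eq] at h
  omega

lemma pvLexLe_fst_not {a b : Int × Int × Int} (h : ¬ pvLexLe a b = true) : b.1 ≤ a.1 := by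
  unfold pvLexLe at h
  simp only [Bool.or_eq_true, Bool.and_eq_true, decide_eq_true_eq, beq_iff_eq] at h
  omega

lemma pvPopMin_none_iff (h : List (Int × Int × Int)) : pvPopMin h = none ↔ h = [] := by
  cases h with
  | nil => simp [pvPopMin]
  | cons a rest =>
    cases hr : pvPopMin rest with
    | none => simp [pvPopMin, hr]
    | some mr =>
      obtain ⟨m0, r0⟩ := mr
      simp only [pvPopMin, hr]
      split <;> simp

lemma pvPopMin_perm {h : List (Int × Int × Int)} {m : Int × Int × Int}
    {r : List (Int × Int × Int)} (e : pvPopMin h = some (m, r)) : h.Perm (m :: r) := by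
  induction h generalizing m r with
  | nil => simp [pvPopMin] at e
  | cons a rest ih =>
    cases hr : pvPopMin rest with
    | none =>
      have hnil : rest = [] := (pvPopMin_none_iff rest).1 hr
      subst hnil
      simp only [pvPopMin, Option.some.injEq, Prod.mk.injEq] at e
      obtain ⟨rfl, rfl⟩ := e
      exact List.Perm.refl _
    | some mr =>
      obtain ⟨m0, r0⟩ := mr
      have hperm := ih hr
      simp only [pvPopMin, hr] at e
      split at e
      · simp only [Option.some.injEq, Prod.mk.injEq] at e
        obtain ⟨rfl, rfl⟩ := e
        exact List.Perm.refl _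
      · simp only [Option.some.injEq, Prod.mk.injEq] at e
        obtain ⟨rfl, rfl⟩ := e
        exact (hperm.cons a).trans (List.Perm.swap _ _ _)

lemma pvPopMin_min {h : List (Int × Int × Int)} {m : Int × Int × Int}
    {r : List (Int × Int × Int)} (e : pvPopMin h = some (m, r)) : ∀ t ∈ h, m.1 ≤ t.1 := by
  induction h generalizing m r with
  | nil => simp [pvPopMin] at e
  | cons a rest ih =>
    cases hr : pvPopMin rest with
    | none =>
      have hnil : rest = [] := (pvPopMin_none_iff rest).1 hr
      subst hnil
      simp only [pvPopMin, Option.some.injEq, Prod.mk.injEq] at e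
      obtain ⟨rfl, rfl⟩ := e
      intro t ht
      simp only [List.mem_singleton] at ht
      subst ht
      exact le_refl _
    | some mr =>
      obtain ⟨m0, r0⟩ := mr
      have hmin := ih hr
      simp only [pvPopMin, hr] at e
      split at e
      · next hle =>
        simp only [Option.some.injEq, Prod.mk.injEq] at e
        obtain ⟨rfl, rfl⟩ := e
        intro t ht
        rcases List.mem_cons.1 ht with rfl | ht
        · exact le_refl _
        · exact le_trans (pvLexLe_fst hle) (hmin t ht)
      · next hle =>
        simp only [Option.some.injEq, Prod.mk.injEq] at e
        obtain ⟨rfl, rfl⟩ := e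
        intro t ht
        rcases List.mem_cons.1 ht with rfl | ht
        · exact pvLexLe_fst_not hle
        · exact hmin t ht

def pvCells (h : List (Int × Int × Int)) : List (Int × Int) := h.map (fun t => (t.2.1, t.2.2))

-- the invariant of A's search state; Rg is the (ghost) set of already counted cells
structure pvAInv (g : List (List Int)) (heap : List (Int × Int × Int))
    (visit : PySem.Set (Int × Int)) (score : Int) (Rg : List (Int × Int)) : Prop where
  nodupR : Rg.Nodup
  nodupH : (pvCells heap).Nodup
  nodupV : visit.Nodup
  disj : ∀ p ∈ Rg, p ∉ pvCells heap
  visEq : ∀ p : Int × Int, p ∈ visit ↔ (p ∈ Rg ∨ p ∈ pvCells heap)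
  score_eq : score = (Rg.length : Int)
  zeroMem : ((0, 0) : Int × Int) ∈ visit
  heapVal : ∀ t ∈ heap, t.1 = pvVal g (t.2.1, t.2.2)
  heapIn : ∀ t ∈ heap, pvIn g (t.2.1, t.2.2)
  heapJust : ∀ t ∈ heap, (t.2.1, t.2.2) = ((0 : Int), (0 : Int)) ∨ ∃ p ∈ Rg, pvAdj p (t.2.1, t.2.2)
  rIn : ∀ p ∈ Rg, pvIn g p
  rNbr : ∀ p ∈ Rg, ∀ p', pvAdj p p' → pvIn g p' → p' ∈ visit

lemma pvAInv_perm {g : List (List Int)} {heap heap' : List (Int × Int × Int)}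
    {visit : PySem.Set (Int × Int)} {score : Int} {Rg : List (Int × Int)}
    (hp : heap.Perm heap') (I : pvAInv g heap visit score Rg) :
    pvAInv g heap' visit score Rg := by
  have hc : (pvCells heap).Perm (pvCells heap') := hp.map _
  exact {
    nodupR := I.nodupR
    nodupH := hc.nodup_iff.1 I.nodupH
    nodupV := I.nodupV
    disj := fun p hp' => fun hm => I.disj p hp' (hc.mem_iff.2 hm)
    visEq := fun p => (I.visEq p).trans (or_congr Iff.rfl hc.mem_iff)
    score_eq := I.score_eq
    zeroMem := I.zeroMem
    heapVal := fun t ht => I.heapVal t (hp.mem_iff.2 ht)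
    heapIn := fun t ht => I.heapIn t (hp.mem_iff.2 ht)
    heapJust := fun t ht => I.heapJust t (hp.mem_iff.2 ht)
    rIn := I.rIn
    rNbr := I.rNbr }

lemma pvAInv_size {g : List (List Int)} {heap : List (Int × Int × Int)}
    {visit : PySem.Set (Int × Int)} {score : Int} {Rg : List (Int × Int)}
    (I : pvAInv g heap visit score Rg) :
    visit.length ≤ (pvR g * pvC g).toNat ∧ heap.length ≤ visit.length := by
  have hvin : ∀ p ∈ visit, pvIn g p := by
    intro p hp
    rcases (I.visEq p).1 hp with h | h
    · exact I.rIn p h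
    · obtain ⟨t, ht, rfl⟩ := List.mem_map.1 h
      exact I.heapIn t ht
  constructor
  · exact pv_card_bound visit I.nodupV hvin
  · have hsub : pvCells heap ⊆ visit := fun p hp => (I.visEq p).2 (Or.inr hp)
    have := (I.nodupH.subperm hsub).length_le
    simpa [pvCells] using this

lemma pvRow0 (g : List (List Int)) : PySem.List.pyGetD g 0 [] = g.headI := by
  cases g with
  | nil => rfl
  | cons a l => exact PySem.List.pyGetD_zero_cons a l []

lemma pvExpand_cond (g : List (List Int)) (a b : Int) :
    (¬(0 ≤ a ∧ a ≤ PySem.List.len g - 1) ∨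
     ¬(0 ≤ b ∧ b ≤ PySem.List.len (PySem.List.pyGetD g 0 []) - 1)) ↔ ¬ pvIn g (a, b) := by
  rw [pvRow0]
  simp only [pvIn, pvR, pvC, PySem.List.len_eq]
  omega

lemma pvExpand_fold (g : List (List Int)) (x y : Int) :
    ∀ (ds : List (Int × Int)) (V : PySem.Set (Int × Int)) (H : List (Int × Int × Int)),
    ∃ ext : List (Int × Int),
      (ds.foldl (pvExpand g x y) (V, H)).1 = V ++ ext ∧
      (ds.foldl (pvExpand g x y) (V, H)).2 = (ext.map (fun c => (pvVal g c, c.1, c.2))).reverse ++ H ∧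
      ext.Nodup ∧
      (∀ c ∈ ext, c ∉ V ∧ pvIn g c ∧ ∃ d ∈ ds, c = (x + d.1, y + d.2)) ∧
      (∀ d ∈ ds, pvIn g (x + d.1, y + d.2) → (x + d.1, y + d.2) ∈ V ++ ext) := by
  intro ds
  induction ds with
  | nil =>
    intro V H
    exact ⟨[], by simp, by simp, by simp, by simp, by simp⟩
  | cons d ds ih =>
    intro V H
    simp only [List.foldl_cons]
    by_cases hin : pvIn g (x + d.1, y + d.2)
    · by_cases hmem : (x + d.1, y + d.2) ∈ V
      · have hstep : pvExpand g x y (V, H) d = (V, H) := by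
          unfold pvExpand
          rw [if_neg, if_pos hmem]
          rw [pvExpand_cond]
          simpa using hin
        rw [hstep]
        obtain ⟨ext, h1, h2, h3, h4, h5⟩ := ih V H
        refine ⟨ext, h1, h2, h3, fun c hc => ?_, fun d' hd' => ?_⟩
        · obtain ⟨e1, e2, d', hd', e3⟩ := h4 c hc
          exact ⟨e1, e2, d', List.mem_cons_of_mem _ hd', e3⟩
        · rcases List.mem_cons.1 hd' with rfl | hd'
          · intro _; exact List.mem_append.2 (Or.inl hmem)
          · exact h5 d' hd'
      · have hstep : pvExpand g x y (V, H) d =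
            (V ++ [(x + d.1, y + d.2)], (pvVal g (x + d.1, y + d.2), x + d.1, y + d.2) :: H) := by
          unfold pvExpand
          rw [if_neg, if_neg hmem, PySem.Set.add_of_not_mem hmem]
          · rfl
          · rw [pvExpand_cond]
            simpa using hin
        rw [hstep]
        obtain ⟨ext, h1, h2, h3, h4, h5⟩ := ih (V ++ [(x + d.1, y + d.2)])
          ((pvVal g (x + d.1, y + d.2), x + d.1, y + d.2) :: H)
        refine ⟨(x + d.1, y + d.2) :: ext, ?_, ?_, ?_, ?_, ?_⟩
        · rw [h1]; simp
        · rw [h2]; simp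
        · refine List.nodup_cons.2 ⟨fun hc => ?_, h3⟩
          exact (h4 _ hc).1 (List.mem_append.2 (Or.inr (List.mem_singleton.2 rfl)))
        · intro c hc
          rcases List.mem_cons.1 hc with rfl | hc
          · exact ⟨hmem, hin, d, List.mem_cons_self .., rfl⟩
          · obtain ⟨e1, e2, d', hd', e3⟩ := h4 c hc
            exact ⟨fun hv => e1 (List.mem_append.2 (Or.inl hv)), e2, d',
              List.mem_cons_of_mem _ hd', e3⟩
        · intro d' hd'
          rcases List.mem_cons.1 hd' with rfl | hd'
          · intro _
            exact List.mem_append.2 (Or.inr (List.mem_cons_self ..))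
          · intro hin'
            have := h5 d' hd' hin'
            rw [List.append_assoc] at this
            simpa using this
    · have hstep : pvExpand g x y (V, H) d = (V, H) := by
        unfold pvExpand
        rw [if_pos]
        rw [pvExpand_cond]
        exact hin
      rw [hstep]
      obtain ⟨ext, h1, h2, h3, h4, h5⟩ := ih V H
      refine ⟨ext, h1, h2, h3, fun c hc => ?_, fun d' hd' => ?_⟩
      · obtain ⟨e1, e2, d', hd', e3⟩ := h4 c hc
        exact ⟨e1, e2, d', List.mem_cons_of_mem _ hd', e3⟩
      · rcases List.mem_cons.1 hd' with rfl | hd'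
        · intro h'; exact absurd h' hin
        · exact h5 d' hd'


lemma pvCells_expand (g : List (List Int)) (ext : List (Int × Int)) :
    pvCells ((ext.map (fun c => (pvVal g c, c.1, c.2))).reverse) = ext.reverse := by
  simp only [pvCells, List.map_reverse, List.map_map]
  have h : ((fun t : Int × Int × Int => (t.2.1, t.2.2)) ∘ (fun c : Int × Int => (pvVal g c, c.1, c.2))) = id := by
    funext c; rfl
  rw [h, List.map_id]

lemma pvAWhile_spec (g : List (List Int)) (q : Int) :
    ∀ (fuel : Nat) (heap : List (Int × Int × Int)) (visit : PySem.Set (Int × Int))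
      (score : Int) (Rg : List (Int × Int)),
    pvAInv g heap visit score Rg →
    (∀ p ∈ Rg, pvReach g q p) →
    heap.length + 2 * ((pvR g * pvC g).toNat - visit.length) < fuel →
    ∃ Rg', Rg ⊆ Rg' ∧
      pvAInv g (pvAWhile g q fuel heap visit score).1 (pvAWhile g q fuel heap visit score).2.1
        (pvAWhile g q fuel heap visit score).2.2 Rg' ∧
      (∀ p ∈ Rg', pvReach g q p) ∧
      (∀ t ∈ (pvAWhile g q fuel heap visit score).1, q ≤ t.1) := by
  intro fuel
  induction fuel with
  | zero => intro heap visit score Rg I hs hf; omega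
  | succ fuel ih =>
    intro heap visit score Rg I hs hf
    cases hpop : pvPopMin heap with
    | none =>
      have hnil : heap = [] := (pvPopMin_none_iff heap).1 hpop
      subst hnil
      refine ⟨Rg, fun p hp => hp, ?_, hs, ?_⟩
      · simpa only [pvAWhile, hpop] using I
      · simp only [pvAWhile, hpop]
        intro t ht
        simp at ht
    | some vr =>
      obtain ⟨⟨v, x, y⟩, rest⟩ := vr
      have hperm := pvPopMin_perm hpop
      have hmin := pvPopMin_min hpop
      by_cases hq : q ≤ v
      · -- `val >= q`: push back and break
        have hres : pvAWhile g q (fuel + 1) heap visit score = ((v, x, y) :: rest, visit, score) := by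
          simp only [pvAWhile, hpop, if_pos hq]
        rw [hres]
        refine ⟨Rg, fun p hp => hp, pvAInv_perm hperm I, hs, ?_⟩
        intro t ht
        rcases List.mem_cons.1 ht with rfl | ht
        · exact hq
        · exact le_trans hq (hmin t (hperm.mem_iff.2 (List.mem_cons_of_mem _ ht)))
      · -- pop (x,y), count it, expand its neighbours
        have hvq : v < q := lt_of_not_ge hq
        have hm : (v, x, y) ∈ heap := hperm.mem_iff.2 (List.mem_cons_self ..)
        have hval : v = pvVal g (x, y) := I.heapVal _ hm
        have hin : pvIn g (x, y) := I.heapIn _ hm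
        have hcellmem : ((x, y) : Int × Int) ∈ pvCells heap :=
          List.mem_map.2 ⟨(v, x, y), hm, rfl⟩
        have hreach : pvReach g q (x, y) := by
          rcases I.heapJust _ hm with h00 | ⟨p, hpR, hadj⟩
          · rw [h00]
            exact pvReach.base (by rw [← h00, ← hval]; exact hvq)
          · exact pvReach.step (hs p hpR) hadj hin (by rw [← hval]; exact hvq)
        have hcnotR : ((x, y) : Int × Int) ∉ Rg := fun hc => I.disj _ hc hcellmem
        have hcperm : (pvCells heap).Perm ((x, y) :: pvCells rest) := hperm.map _
        have hcnodup : (((x, y) : Int × Int) :: pvCells rest).Nodup := hcperm.nodup_iff.1 I.nodupH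
        have hcrest_sub : ∀ p ∈ pvCells rest, p ∈ visit := fun p hp =>
          (I.visEq p).2 (Or.inr (hcperm.mem_iff.2 (List.mem_cons_of_mem _ hp)))
        have hvmem : ((x, y) : Int × Int) ∈ visit := (I.visEq _).2 (Or.inr hcellmem)
        obtain ⟨ext, hV, hH, hextnd, hextP, hcov⟩ := pvExpand_fold g x y pvDirs visit rest
        set st := pvDirs.foldl (pvExpand g x y) (visit, rest) with hst
        have hres : pvAWhile g q (fuel + 1) heap visit score =
            pvAWhile g q fuel st.2 st.1 (score + 1) := by
          simp only [pvAWhile, hpop, if_neg hq]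
          rfl
        have hcells1 : pvCells st.2 = ext.reverse ++ pvCells rest := by
          rw [hH, pvCells, List.map_append, ← pvCells, ← pvCells, pvCells_expand]
        have hextV : ∀ c ∈ ext, c ∉ visit := fun c hc => (hextP c hc).1
        have hextIn : ∀ c ∈ ext, pvIn g c := fun c hc => (hextP c hc).2.1
        have hextAdj : ∀ c ∈ ext, pvAdj (x, y) c := by
          intro c hc
          obtain ⟨-, -, d, hd, he⟩ := hextP c hc
          exact ⟨d, hd, he⟩
        have hRg1nd : (Rg ++ [((x, y) : Int × Int)]).Nodup := by
          refine List.Nodup.append I.nodupR (by simp) ?_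
          intro a ha hb
          simp only [List.mem_singleton] at hb
          subst hb
          exact hcnotR ha
        have I1 : pvAInv g st.2 st.1 (score + 1) (Rg ++ [(x, y)]) := by
          refine {
            nodupR := hRg1nd
            nodupH := ?_
            nodupV := ?_
            disj := ?_
            visEq := ?_
            score_eq := ?_
            zeroMem := ?_
            heapVal := ?_
            heapIn := ?_
            heapJust := ?_
            rIn := ?_
            rNbr := ?_ }
          · rw [hcells1]
            refine List.Nodup.append (List.nodup_reverse.2 hextnd) (List.nodup_cons.1 hcnodup).2 ?_
            intro a ha hb
            exact hextV a (List.mem_reverse.1 ha) (hcrest_sub a hb)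
          · rw [hV]
            refine List.Nodup.append I.nodupV hextnd ?_
            intro a ha hb
            exact hextV a hb ha
          · intro p hp hmem
            rw [hcells1] at hmem
            rcases List.mem_append.1 hmem with hmem | hmem
            · rw [List.mem_reverse] at hmem
              rcases List.mem_append.1 hp with hp | hp
              · exact hextV p hmem ((I.visEq p).2 (Or.inl hp))
              · simp only [List.mem_singleton] at hp
                subst hp
                exact hextV _ hmem hvmem
            · rcases List.mem_append.1 hp with hp | hp
              · exact I.disj p hp (hcperm.mem_iff.2 (List.mem_cons_of_mem _ hmem))
              · simp only [List.mem_singleton] at hp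
                subst hp
                exact (List.nodup_cons.1 hcnodup).1 hmem
          · intro p
            rw [hV, hcells1]
            constructor
            · intro hp
              rcases List.mem_append.1 hp with hp | hp
              · rcases (I.visEq p).1 hp with hp | hp
                · exact Or.inl (List.mem_append.2 (Or.inl hp))
                · rcases List.mem_cons.1 (hcperm.mem_iff.1 hp) with rfl | hp
                  · exact Or.inl (List.mem_append.2 (Or.inr (by simp)))
                  · exact Or.inr (List.mem_append.2 (Or.inr hp))
              · exact Or.inr (List.mem_append.2 (Or.inl (List.mem_reverse.2 hp)))
            · intro hp
              rcases hp with hp | hp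
              · rcases List.mem_append.1 hp with hp | hp
                · exact List.mem_append.2 (Or.inl ((I.visEq p).2 (Or.inl hp)))
                · simp only [List.mem_singleton] at hp
                  subst hp
                  exact List.mem_append.2 (Or.inl hvmem)
              · rcases List.mem_append.1 hp with hp | hp
                · exact List.mem_append.2 (Or.inr (List.mem_reverse.1 hp))
                · exact List.mem_append.2 (Or.inl (hcrest_sub p hp))
          · rw [I.score_eq]
            simp only [List.length_append, List.length_singleton]
            push_cast
            ring
          · rw [hV]
            exact List.mem_append.2 (Or.inl I.zeroMem)
          · intro t ht
            rw [hH] at ht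
            rcases List.mem_append.1 ht with ht | ht
            · rw [List.mem_reverse] at ht
              obtain ⟨c, hc, rfl⟩ := List.mem_map.1 ht
              rfl
            · exact I.heapVal t (hperm.mem_iff.2 (List.mem_cons_of_mem _ ht))
          · intro t ht
            rw [hH] at ht
            rcases List.mem_append.1 ht with ht | ht
            · rw [List.mem_reverse] at ht
              obtain ⟨c, hc, rfl⟩ := List.mem_map.1 ht
              exact hextIn c hc
            · exact I.heapIn t (hperm.mem_iff.2 (List.mem_cons_of_mem _ ht))
          · intro t ht
            rw [hH] at ht
            rcases List.mem_append.1 ht with ht | ht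
            · rw [List.mem_reverse] at ht
              obtain ⟨c, hc, rfl⟩ := List.mem_map.1 ht
              exact Or.inr ⟨(x, y), List.mem_append.2 (Or.inr (by simp)), hextAdj c hc⟩
            · rcases I.heapJust t (hperm.mem_iff.2 (List.mem_cons_of_mem _ ht)) with h | ⟨p, hp, ha⟩
              · exact Or.inl h
              · exact Or.inr ⟨p, List.mem_append.2 (Or.inl hp), ha⟩
          · intro p hp
            rcases List.mem_append.1 hp with hp | hp
            · exact I.rIn p hp
            · simp only [List.mem_singleton] at hp
              subst hp
              exact hin
          · intro p hp p' hadj hin'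
            rw [hV]
            rcases List.mem_append.1 hp with hp | hp
            · exact List.mem_append.2 (Or.inl (I.rNbr p hp p' hadj hin'))
            · simp only [List.mem_singleton] at hp
              subst hp
              obtain ⟨d, hd, rfl⟩ := hadj
              exact hcov d hd hin'
        have hs1 : ∀ p ∈ Rg ++ [((x, y) : Int × Int)], pvReach g q p := by
          intro p hp
          rcases List.mem_append.1 hp with hp | hp
          · exact hs p hp
          · simp only [List.mem_singleton] at hp
            subst hp
            exact hreach
        have hsz := pvAInv_size I
        have hsz1 := pvAInv_size I1
        have hf1 : st.2.length + 2 * ((pvR g * pvC g).toNat - st.1.length) < fuel := by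
          have hlen2 : st.2.length = ext.length + rest.length := by
            rw [hH]
            simp
          have hlen1 : st.1.length = visit.length + ext.length := by
            rw [hV]
            simp
          have hhr : heap.length = rest.length + 1 := by
            have := hperm.length_eq
            simpa using this
          omega
        obtain ⟨Rg', hsub', I', hs', hGE⟩ := ih st.2 st.1 (score + 1) (Rg ++ [(x, y)]) I1 hs1 hf1
        rw [hres]
        refine ⟨Rg', fun p hp => hsub' (List.mem_append.2 (Or.inl hp)), I', hs', hGE⟩


-- ---------- assembling the equivalence ----------

lemma pvAInv_closed {g : List (List Int)} {q : Int} {heap : List (Int × Int × Int)}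
    {visit : PySem.Set (Int × Int)} {score : Int} {Rg : List (Int × Int)}
    (I : pvAInv g heap visit score Rg) (hs : ∀ p ∈ Rg, pvReach g q p)
    (hGE : ∀ t ∈ heap, q ≤ t.1) : ∀ p, p ∈ Rg ↔ pvReach g q p := by
  refine pv_sandwich Rg hs ?_ ?_
  · intro h0
    rcases (I.visEq _).1 I.zeroMem with h | h
    · exact h
    · exfalso
      obtain ⟨t, ht, hteq⟩ := List.mem_map.1 h
      have h1 := I.heapVal t ht
      rw [hteq] at h1
      have := hGE t ht
      omega
  · intro p hp p' hadj hin hval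
    rcases (I.visEq p').1 (I.rNbr p hp p' hadj hin) with h | h
    · exact h
    · exfalso
      obtain ⟨t, ht, hteq⟩ := List.mem_map.1 h
      have h1 := I.heapVal t ht
      rw [hteq] at h1
      have := hGE t ht
      omega

lemma pvScore_eq (g : List (List Int)) (h00 : pvIn g (0, 0)) (q : Int)
    (Rg : List (Int × Int)) (hnd : Rg.Nodup) (hmem : ∀ p, p ∈ Rg ↔ pvReach g q p) :
    (Rg.length : Int) = pvCompSize g (pvR g) (pvC g) q := by
  obtain ⟨S, hSnd, hSmem, hSval⟩ := pvCompSize_spec g h00 q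
  rw [hSval]
  congr 1
  exact pv_count_unique Rg S hnd hSnd (fun p => (hmem p).trans (hSmem p).symm)

-- A's state tuple: (heap, score, result, visit, dict)
def pvAState : Type :=
  List (Int × Int × Int) × Int × List Int × PySem.Set (Int × Int) × PySem.Dict Int (List Int)

-- the body of A's `for q in queries` loop, named for the proofs
def pvAStep (g : List (List Int)) (fuel : Nat) (st : pvAState) (q : Int) : pvAState :=
  let (heap, score, result, visit, d) := st
  let w := pvAWhile g q fuel heap visit score
  let lst := PySem.Dict.getD d q []
  let idx := PySem.List.pyGetD lst (-1) 0
  let result' := PySem.List.pySetD result idx w.2.2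
  let d' := d.insert q lst.dropLast
  (w.1, w.2.2, result', w.2.1, d')

def pvDict0 (qs : List Int) : PySem.Dict Int (List Int) :=
  (PySem.List.enumerate qs 0).foldl (fun d p => d.modify p.2 [] (· ++ [p.1])) PySem.Dict.empty

lemma pvA_eq (g : List (List Int)) (qs : List Int) :
    maxNumOfPtsFromQueries g qs =
      ((PySem.List.sorted qs (fun x => x) false).foldl
        (pvAStep g (g.length * (g.headI).length * 3 + 3))
        ([(pvCell g 0 0, 0, 0)], (0 : Int), PySem.List.pyRepeat [(0 : Int)] (PySem.List.len qs),
          PySem.Set.ofList [((0 : Int), (0 : Int))], pvDict0 qs)).2.2.1 := rfl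

lemma pvB_eq (g : List (List Int)) (qs : List Int) :
    maxNumOfPtsFromQueries_alt g qs = qs.map (fun q => pvCompSize g (pvR g) (pvC g) q) := by
  unfold maxNumOfPtsFromQueries_alt
  rw [pvRow0]
  simp [PySem.List.len_eq, pvR, pvC]

lemma pvDict0_getD (qs : List Int) (k : Int) :
    (pvDict0 qs).getD k [] =
      ((PySem.List.enumerate qs 0).filter (fun p => p.2 == k)).map (·.1) := by
  unfold pvDict0
  have h1 : (PySem.List.enumerate qs 0).foldl (fun d p => d.modify p.2 [] (· ++ [p.1]))
      PySem.Dict.empty =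
      ((PySem.List.enumerate qs 0).map Prod.swap).foldl
        (fun d p => d.modify p.1 [] (· ++ [p.2])) PySem.Dict.empty := by
    rw [List.foldl_map]
    rfl
  rw [h1, PySem.Dict.getD_foldl_modify_append, PySem.Dict.getD_empty, List.nil_append,
    List.filter_map]
  rw [List.map_map]
  congr 1

lemma pvPos_elem (qs : List Int) (k : Int) :
    ∀ i ∈ ((PySem.List.enumerate qs 0).filter (fun p => p.2 == k)).map (·.1),
      ∃ j : Nat, j < qs.length ∧ i = (j : Int) ∧ qs[j]? = some k := by
  intro i hi
  obtain ⟨p, hp, rfl⟩ := List.mem_map.1 hi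
  obtain ⟨hpe, hpk⟩ := List.mem_filter.1 hp
  obtain ⟨j, hj, rfl⟩ := (PySem.List.mem_enumerate_iff _ _ _).1 hpe
  simp only [beq_iff_eq] at hpk
  refine ⟨j, hj, by simp, ?_⟩
  rw [List.getElem?_eq_getElem hj, ← hpk]

lemma pvPos_nodup (qs : List Int) (k : Int) :
    (((PySem.List.enumerate qs 0).filter (fun p => p.2 == k)).map (·.1)).Nodup := by
  have h1 := (PySem.List.pairwise_lt_enumerate qs 0).filter (fun p => p.2 == k)
  have h2 : (((PySem.List.enumerate qs 0).filter (fun p => p.2 == k)).map (·.1)).Pairwise (· < ·) :=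
    List.pairwise_map.2 h1
  exact h2.imp (fun h => ne_of_lt h)

lemma pvPos_len (qs : List Int) (k : Int) :
    (((PySem.List.enumerate qs 0).filter (fun p => p.2 == k)).map (·.1)).length = qs.count k := by
  rw [List.length_map, ← List.countP_eq_length_filter]
  have h1 : qs.count k = List.countP (fun x => x == k) qs := rfl
  rw [h1]
  conv_rhs => rw [← PySem.List.map_snd_enumerate qs 0]
  rw [List.countP_map]
  rfl

lemma pvPos_mem (qs : List Int) (j : Nat) (hj : j < qs.length) :
    (j : Int) ∈ ((PySem.List.enumerate qs 0).filter (fun p => p.2 == qs[j])).map (·.1) := by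
  refine List.mem_map.2 ⟨((j : Int), qs[j]), ?_, rfl⟩
  refine List.mem_filter.2 ⟨?_, by simp⟩
  exact (PySem.List.mem_enumerate_iff _ _ _).2 ⟨j, hj, by simp⟩

-- the invariant carried over the processing of the sorted queries
def pvMainInv (g : List (List Int)) (orig : List Int) (S : List Int) (st : pvAState) : Prop :=
  ∃ Rg : List (Int × Int),
    pvAInv g st.1 st.2.2.2.1 st.2.1 Rg ∧
    (∀ q' ∈ S, ∀ p ∈ Rg, pvReach g q' p) ∧
    st.2.2.1.length = orig.length ∧
    (∀ k : Int,
      (∀ i ∈ (st.2.2.2.2).getD k [],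
        ∃ j : Nat, j < orig.length ∧ i = (j : Int) ∧ orig[j]? = some k) ∧
      ((st.2.2.2.2).getD k []).Nodup ∧
      ((st.2.2.2.2).getD k []).length = S.count k) ∧
    (∀ j : Nat, j < orig.length →
      st.2.2.1[j]? = some (pvCompSize g (pvR g) (pvC g) (orig.getD j 0)) ∨
      ((j : Int)) ∈ (st.2.2.2.2).getD (orig.getD j 0) [])

lemma pvN_eq (g : List (List Int)) : (pvR g * pvC g).toNat = g.length * g.headI.length := by
  rw [pvR, pvC, ← Nat.cast_mul, Int.toNat_natCast]

lemma pvMain_step (g : List (List Int)) (orig : List Int) (h00 : pvIn g (0, 0)) (q : Int)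
    (S' : List Int) (hle : ∀ q' ∈ S', q ≤ q') (st : pvAState)
    (hI : pvMainInv g orig (q :: S') st) :
    pvMainInv g orig S' (pvAStep g (g.length * (g.headI).length * 3 + 3) st q) := by
  obtain ⟨heap, score, result, visit, d⟩ := st
  obtain ⟨Rg, I, hsound, hrlen, hdict, hcov⟩ := hI
  simp only at I hsound hrlen hdict hcov
  have hsz := pvAInv_size I
  have hfuel : heap.length + 2 * ((pvR g * pvC g).toNat - visit.length) <
      g.length * (g.headI).length * 3 + 3 := by
    rw [pvN_eq] at hsz ⊢
    omega
  obtain ⟨Rg', hsub, I', hs', hGE⟩ :=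
    pvAWhile_spec g q (g.length * (g.headI).length * 3 + 3) heap visit score Rg I
      (fun p hp => hsound q (List.mem_cons_self ..) p hp) hfuel
  set w := pvAWhile g q (g.length * (g.headI).length * 3 + 3) heap visit score with hw
  have hmemRg' : ∀ p, p ∈ Rg' ↔ pvReach g q p := pvAInv_closed I' hs' hGE
  have hscore : w.2.2 = pvCompSize g (pvR g) (pvC g) q := by
    rw [I'.score_eq]
    exact pvScore_eq g h00 q Rg' I'.nodupR hmemRg'
  -- the dict bookkeeping
  have hcq := hdict q
  have hne : d.getD q [] ≠ [] := by
    intro hnil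
    have := hcq.2.2
    rw [hnil, List.count_cons_self] at this
    simp at this
  have hidx : PySem.List.pyGetD (d.getD q []) (-1) 0 = (d.getD q []).getLast hne :=
    PySem.List.pyGetD_neg_one _ _ hne
  obtain ⟨j0, hj0lt, hj0eq, hj0get⟩ := hcq.1 _ (List.getLast_mem hne)
  have hj0r : j0 < result.length := by rw [hrlen]; exact hj0lt
  have hset : PySem.List.pySetD result (PySem.List.pyGetD (d.getD q []) (-1) 0) w.2.2 =
      result.set j0 w.2.2 := by
    rw [hidx, hj0eq]
    unfold PySem.List.pySetD
    rw [PySem.List.pySet?_natCast _ _ _ hj0r]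
    rfl
  show pvMainInv g orig S'
    (w.1, w.2.2,
      PySem.List.pySetD result (PySem.List.pyGetD (PySem.Dict.getD d q []) (-1) 0) w.2.2,
      w.2.1, d.insert q ((PySem.Dict.getD d q []).dropLast))
  rw [hset]
  refine ⟨Rg', I', ?_, ?_, ?_, ?_⟩
  · intro q' hq' p hp
    exact pvReach_mono (hle q' hq') (hs' p hp)
  · show (result.set j0 w.2.2).length = orig.length
    rw [List.length_set]
    exact hrlen
  · intro k
    by_cases hk : k = q
    · subst hk
      show (∀ i ∈ (d.insert k ((d.getD k []).dropLast)).getD k [], _) ∧ _ ∧ _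
      rw [PySem.Dict.getD_insert_self]
      refine ⟨fun i hi => (hdict k).1 i (List.mem_of_mem_dropLast hi),
        (List.dropLast_sublist _).nodup (hdict k).2.1, ?_⟩
      have hlen := (hdict k).2.2
      rw [List.count_cons_self] at hlen
      rw [List.length_dropLast, hlen]
      omega
    · show (∀ i ∈ (d.insert q ((d.getD q []).dropLast)).getD k [], _) ∧ _ ∧ _
      rw [PySem.Dict.getD_insert_of_ne _ _ _ hk]
      refine ⟨(hdict k).1, (hdict k).2.1, ?_⟩
      have hlen := (hdict k).2.2
      rw [List.count_cons_of_ne (fun h => hk h.symm)] at hlen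
      exact hlen
  · intro j hj
    have horigj : orig.getD j 0 = orig[j] := List.getD_eq_getElem _ _ hj
    rcases hcov j hj with hres | hmem
    · by_cases hjj : j = j0
      · subst hjj
        left
        show (result.set j w.2.2)[j]? = some (pvCompSize g (pvR g) (pvC g) (orig.getD j 0))
        rw [List.getElem?_set_self hj0r, hscore]
        have hq' : orig.getD j 0 = q := by
          rw [horigj]
          have := hj0get
          rw [List.getElem?_eq_getElem hj] at this
          exact Option.some.inj this
        rw [hq']
      · left
        show (result.set j0 w.2.2)[j]? = some (pvCompSize g (pvR g) (pvC g) (orig.getD j 0))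
        rw [List.getElem?_set_ne (fun h => hjj h.symm)]
        exact hres
    · by_cases hk : orig.getD j 0 = q
      · have hmem' : (j : Int) ∈ d.getD q [] := by rw [← hk]; exact hmem
        rw [← List.dropLast_append_getLast hne] at hmem'
        rcases List.mem_append.1 hmem' with hdl | hlast
        · right
          show (j : Int) ∈ (d.insert q ((d.getD q []).dropLast)).getD (orig.getD j 0) []
          rw [hk, PySem.Dict.getD_insert_self]
          exact hdl
        · simp only [List.mem_singleton] at hlast
          rw [hj0eq] at hlast
          have hjj : j = j0 := by exact_mod_cast hlast
          subst hjj
          left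
          show (result.set j w.2.2)[j]? = some (pvCompSize g (pvR g) (pvC g) (orig.getD j 0))
          rw [List.getElem?_set_self hj0r, hscore, hk]
      · right
        show (j : Int) ∈ (d.insert q ((d.getD q []).dropLast)).getD (orig.getD j 0) []
        rw [PySem.Dict.getD_insert_of_ne _ _ _ hk]
        exact hmem

lemma pvMain_fold (g : List (List Int)) (orig : List Int) (h00 : pvIn g (0, 0)) :
    ∀ (S : List Int) (st : pvAState), S.Pairwise (· ≤ ·) → pvMainInv g orig S st →
      pvMainInv g orig [] (S.foldl (pvAStep g (g.length * (g.headI).length * 3 + 3)) st) := by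
  intro S
  induction S with
  | nil => intro st _ h; exact h
  | cons q S' ih =>
    intro st hpw hI
    obtain ⟨hle, hpw'⟩ := List.pairwise_cons.1 hpw
    exact ih _ hpw' (pvMain_step g orig h00 q S' hle st hI)

lemma pvMainInv_init (g : List (List Int)) (qs : List Int) (h00 : pvIn g (0, 0)) :
    pvMainInv g qs (PySem.List.sorted qs (fun x => x) false)
      ([(pvCell g 0 0, 0, 0)], (0 : Int), PySem.List.pyRepeat [(0 : Int)] (PySem.List.len qs),
        PySem.Set.ofList [((0 : Int), (0 : Int))], pvDict0 qs) := by
  refine ⟨[], ?_, ?_, ?_, ?_, ?_⟩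
  · refine {
      nodupR := by simp
      nodupH := by simp [pvCells]
      nodupV := by simp
      disj := by simp
      visEq := ?_
      score_eq := by simp
      zeroMem := by simp
      heapVal := ?_
      heapIn := ?_
      heapJust := ?_
      rIn := by simp
      rNbr := by simp }
    · intro p
      show p ∈ [((0 : Int), (0 : Int))] ↔ _
      simp [pvCells]
    · intro t ht
      simp only [List.mem_singleton] at ht
      subst ht
      rfl
    · intro t ht
      simp only [List.mem_singleton] at ht
      subst ht
      exact h00
    · intro t ht
      simp only [List.mem_singleton] at ht
      subst ht
      exact Or.inl rfl
  · simp
  · show (PySem.List.pyRepeat [(0 : Int)] (PySem.List.len qs)).length = qs.length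
    rw [PySem.List.pyRepeat_singleton, List.length_replicate, PySem.List.len_eq,
      Int.toNat_natCast]
  · intro k
    show (∀ i ∈ (pvDict0 qs).getD k [], _) ∧ _ ∧ _
    rw [pvDict0_getD]
    refine ⟨pvPos_elem qs k, pvPos_nodup qs k, ?_⟩
    rw [pvPos_len qs k]
    exact ((PySem.List.sorted_perm qs (fun x => x) false).count_eq k).symm
  · intro j hj
    right
    show ((j : Nat) : Int) ∈ (pvDict0 qs).getD (qs.getD j 0) []
    rw [pvDict0_getD, List.getD_eq_getElem _ _ hj]
    exact pvPos_mem qs j hj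

-- ===== VERDICT (by name: the statement is the Claim_ definition above) =====
theorem maxNumOfPtsFromQueries_spec : Claim_equal_maxNumOfPtsFromQueries := by
  intro g qs hdom hpre
  obtain ⟨hg, hh, hrows⟩ := hpre
  have h00 : pvIn g ((0 : Int), (0 : Int)) := by
    refine ⟨le_refl 0, ?_, le_refl 0, ?_⟩
    · show (0 : Int) < pvR g
      rw [pvR]
      exact_mod_cast List.length_pos_iff.2 hg
    · show (0 : Int) < pvC g
      rw [pvC]
      exact_mod_cast List.length_pos_iff.2 hh
  show maxNumOfPtsFromQueries g qs = maxNumOfPtsFromQueries_alt g qs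
  rw [pvA_eq, pvB_eq]
  have hfinal := pvMain_fold g qs h00 (PySem.List.sorted qs (fun x => x) false) _
    (PySem.List.sorted_pairwise qs (fun x => x)) (pvMainInv_init g qs h00)
  obtain ⟨RgF, _, _, hrlenF, hdictF, hcovF⟩ := hfinal
  apply List.ext_getElem?
  intro i
  by_cases hi : i < qs.length
  · rcases hcovF i (by rw [← hrlenF] at hi ⊢; exact hi) with hres | hmem
    · rw [hres, List.getElem?_map, List.getElem?_eq_getElem hi]
      simp only [Option.map_some]
      rw [List.getD_eq_getElem _ _ hi]
    · exfalso
      have hlen := (hdictF (qs.getD i 0)).2.2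
      simp only [List.count_nil] at hlen
      rw [List.eq_nil_of_length_eq_zero hlen] at hmem
      simp at hmem
  · rw [List.getElem?_eq_none, List.getElem?_eq_none]
    · rw [List.length_map]
      omega
    · omega
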